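-- pv_equiv track=rewrite | github.com/pypi-data/pypi-mirror-183 | packages/insight-extractor-package/insight_extractor_package-0.0.7-py3-none-any.whl/TakeBlipInsightExtractor/visualization/entity_hierarchy.py | sorted_entities
-- ===== SOURCE A (Python) =====
-- import operator
--
-- def sorted_entities(entities_list: list,
--                     filtered_messages_dict: dict) -> tuple:
--     """Sort entities by frequency
--
--
--     Parameters
--     ----------
--     entities_list: list
--         list with the entities of a cluster.
--     filtered_messages_dict: list
--         dictionary with the relation entity-message
--
--     Returns
--     -------
--     tuple
--         the sorted entities, the cumulative frequency and sorted messages.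
--     """
--     aux_list = []
--     for entity in entities_list:
--         sorted_messages = sorted(filtered_messages_dict[entity],
--                                  key=operator.itemgetter(1), reverse=True)
--
--         aux_list.append([entity, sorted_messages,
--                          sum(value[1] for value in sorted_messages)])
--     aux_list = sorted(aux_list, key=operator.itemgetter(2), reverse=True)
--     entities_sorted = [value[0] for value in aux_list]
--     msg_sorted = [value[1] for value in aux_list]
--     freq = sum([value[2] for value in aux_list])
--     return entities_sorted, freq, msg_sorted
-- ===== SOURCE B (Python) =====
-- def sorted_entities(entities_list: list,
--                     filtered_messages_dict: dict) -> tuple: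
--     """Single pass: keep the ranking ordered at all times by linear insertion
--     (no call to sorted); frequency is accumulated as entities are processed."""
--     def insort_desc(items, item, k):
--         head = []
--         i = 0
--         while i < len(items) and k(items[i]) >= k(item):
--             head.append(items[i])
--             i += 1
--         return head + [item] + items[i:]
--
--     ranked = []
--     freq = 0
--     for entity in entities_list:
--         msgs = []
--         for m in filtered_messages_dict[entity]:
--             msgs = insort_desc(msgs, m, lambda p: p[1])
--         total = sum(p[1] for p in msgs)
--         freq += total
--         ranked = insort_desc(ranked, (entity, msgs, total), lambda t: t[2])
--     return [t[0] for t in ranked], freq, [t[1] for t in ranked]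
-- ===== Notes on version B (the rewrite author's own statement) =====
-- stated objective: alternative
-- what changed: B never calls sorted: it maintains the descending ranking (and each entity's message list) as an always-ordered accumulator via stable linear insertion in one pass over the input, accumulating the cumulative frequency on the fly instead of summing a sorted triple list afterwards.
import Mathlib
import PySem

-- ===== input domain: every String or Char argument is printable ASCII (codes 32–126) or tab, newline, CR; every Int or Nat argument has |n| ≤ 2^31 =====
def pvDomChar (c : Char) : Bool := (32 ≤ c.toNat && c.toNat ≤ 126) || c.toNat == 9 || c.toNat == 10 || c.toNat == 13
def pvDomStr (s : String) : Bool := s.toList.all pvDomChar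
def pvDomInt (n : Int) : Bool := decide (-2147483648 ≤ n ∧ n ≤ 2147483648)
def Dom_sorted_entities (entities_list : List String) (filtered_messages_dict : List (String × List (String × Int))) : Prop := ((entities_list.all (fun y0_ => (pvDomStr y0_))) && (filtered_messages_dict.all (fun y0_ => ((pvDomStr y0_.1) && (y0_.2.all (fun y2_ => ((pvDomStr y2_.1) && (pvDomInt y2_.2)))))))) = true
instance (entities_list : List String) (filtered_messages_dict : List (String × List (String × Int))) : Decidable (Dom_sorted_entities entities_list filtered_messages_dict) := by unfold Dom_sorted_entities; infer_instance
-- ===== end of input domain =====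

-- B maintains an always-ordered ranking by stable linear insertion in one pass (no sort call),
-- accumulating the cumulative frequency on the fly: an alternative algorithm of similar cost.


-- ===== PORT A =====
def sorted_entities (entities_list : List String) (filtered_messages_dict : List (String × List (String × Int))) : List String × Int × (List (List (String × Int))) :=
  let aux_list := entities_list.foldl (fun acc entity =>
    let sorted_messages := PySem.List.sorted (((PySem.Dict.mk filtered_messages_dict).get? entity).getD []) (fun v => v.2) true
    acc ++ [(entity, sorted_messages, sorted_messages.foldl (fun s v => s + v.2) 0)]) []
  let aux_list2 := PySem.List.sorted aux_list (fun v => v.2.2) true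
  let entities_sorted := aux_list2.map (fun v => v.1)
  let msg_sorted := aux_list2.map (fun v => v.2.1)
  let freq := (aux_list2.map (fun v => v.2.2)).foldl (fun s v => s + v) 0
  (entities_sorted, freq, msg_sorted)

-- ===== PORT B =====
-- Source B's insort_desc: insert item after every element whose key is ≥ its key (stable, descending)
def insortDesc {α : Type} (items : List α) (item : α) (k : α → Int) : List α :=
  match items with
  | [] => [item]
  | y :: t => if k y ≥ k item then y :: insortDesc t item k else item :: y :: t

def sorted_entities_alt (entities_list : List String) (filtered_messages_dict : List (String × List (String × Int))) : List String × Int × (List (List (String × Int))) :=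
  let st := entities_list.foldl (fun (st : List (String × List (String × Int) × Int) × Int) entity =>
    let msgs := (((PySem.Dict.mk filtered_messages_dict).get? entity).getD []).foldl
      (fun ms m => insortDesc ms m (fun p => p.2)) []
    let total := msgs.foldl (fun s p => s + p.2) 0
    (insortDesc st.1 (entity, msgs, total) (fun t => t.2.2), st.2 + total)) ([], 0)
  (st.1.map (fun t => t.1), st.2, st.1.map (fun t => t.2.1))

-- ===== PRECONDITION & SPEC =====
-- Pre_ excludes exactly the inputs where some entity is not a key of the dict: there Python A
-- (and Python B) raise KeyError, returning no value.
def Pre_sorted_entities (entities_list : List String) (filtered_messages_dict : List (String × List (String × Int))) : Prop :=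
  ∀ e ∈ entities_list, (PySem.Dict.mk filtered_messages_dict).contains e = true
instance (entities_list : List String) (filtered_messages_dict : List (String × List (String × Int))) : Decidable (Pre_sorted_entities entities_list filtered_messages_dict) := by unfold Pre_sorted_entities; infer_instance

def pvWitness_sorted_entities : List String × (List (String × List (String × Int))) :=
  (["a", "b", "a"], [("a", [("x", 1), ("y", 3)]), ("b", [("z", 2)])])

def Spec_sorted_entities (entities_list : List String) (filtered_messages_dict : List (String × List (String × Int))) (out : List String × Int × (List (List (String × Int)))) : Prop := out = sorted_entities_alt entities_list filtered_messages_dict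
instance (entities_list : List String) (filtered_messages_dict : List (String × List (String × Int))) (out : List String × Int × (List (List (String × Int)))) : Decidable (Spec_sorted_entities entities_list filtered_messages_dict out) := by unfold Spec_sorted_entities; infer_instance

-- ===== CLAIM =====
def Claim_equal_sorted_entities : Prop := ∀ (entities_list : List String) (filtered_messages_dict : List (String × List (String × Int))), Dom_sorted_entities entities_list filtered_messages_dict → Pre_sorted_entities entities_list filtered_messages_dict → Spec_sorted_entities entities_list filtered_messages_dict (sorted_entities entities_list filtered_messages_dict)

-- ===== LEMMAS AND PROOFS =====

-- B's insertion is PySem's insertBy with the reverse-sort predicate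
theorem insortDesc_eq_insertBy {α : Type} (k : α → Int) (items : List α) (item : α) :
    insortDesc items item k = PySem.List.insertBy (fun a b => decide (k b < k a)) item items := by
  induction items with
  | nil => rfl
  | cons y t ih =>
    simp only [insortDesc, PySem.List.insertBy]
    by_cases h : k y ≥ k item
    · have : ¬ (k y < k item) := not_lt.mpr h
      simp [h, this, ih]
    · have : k y < k item := lt_of_not_ge h
      simp [h, this]

-- folding B's insertion from [] is Python's sorted(…, reverse=True)
theorem foldl_insortDesc_eq_sorted {α : Type} (k : α → Int) (l : List α) :
    l.foldl (fun acc x => insortDesc acc x k) [] = PySem.List.sorted l k true := by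
  rw [PySem.List.sorted_rev_eq_foldl_insertBy]
  have h : (fun (acc : List α) x => insortDesc acc x k)
      = fun acc x => PySem.List.insertBy (fun a b => decide (k b < k a)) x acc := by
    funext acc x; exact insortDesc_eq_insertBy k acc x
  rw [h]

-- the per-entity data both ports compute
def pvMsgs (d : List (String × List (String × Int))) (e : String) : List (String × Int) :=
  PySem.List.sorted (((PySem.Dict.mk d).get? e).getD []) (fun v => v.2) true
def pvTot (d : List (String × List (String × Int))) (e : String) : Int :=
  (pvMsgs d e).foldl (fun s v => s + v.2) 0
def pvF (d : List (String × List (String × Int))) (e : String) : String × List (String × Int) × Int :=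
  (e, pvMsgs d e, pvTot d e)

theorem foldl_append_singleton_eq_map {α β : Type} (g : α → β) (l : List α) (acc : List β) :
    l.foldl (fun a x => a ++ [g x]) acc = acc ++ l.map g := by
  induction l generalizing acc with
  | nil => simp
  | cons x t ih => simp [List.foldl_cons, ih]

-- a fold whose two components do not interact splits
theorem foldl_prod_split {α β γ : Type} (f : β → α → β) (g : γ → α → γ) (l : List α) (b : β) (c : γ) :
    l.foldl (fun st x => (f st.1 x, g st.2 x)) (b, c) = (l.foldl f b, l.foldl g c) := by
  induction l generalizing b c with
  | nil => rfl
  | cons x t ih => simp [List.foldl_cons, ih]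

theorem foldl_add_eq_sum {l : List Int} {a : Int} : l.foldl (fun s v => s + v) a = a + l.sum := by
  induction l generalizing a with
  | nil => simp
  | cons x t ih => simp [List.foldl_cons, ih]; ring

theorem foldl_add_comp_eq_sum {α : Type} (h : α → Int) (l : List α) (a : Int) :
    l.foldl (fun s e => s + h e) a = a + (l.map h).sum := by
  induction l generalizing a with
  | nil => simp
  | cons x t ih => simp [List.foldl_cons, ih]; ring

-- ===== VERDICT =====
theorem sorted_entities_spec : Claim_equal_sorted_entities := by
  intro el d _ _
  simp only [Spec_sorted_entities, sorted_entities, sorted_entities_alt]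
  -- A's aux list is el mapped through pvF
  have haux : el.foldl (fun acc entity =>
      acc ++ [(entity,
        PySem.List.sorted (((PySem.Dict.mk d).get? entity).getD []) (fun v => v.2) true,
        (PySem.List.sorted (((PySem.Dict.mk d).get? entity).getD []) (fun v => v.2) true).foldl
          (fun s v => s + v.2) 0)]) []
      = el.map (pvF d) := by
    have := foldl_append_singleton_eq_map (pvF d) el []
    simpa [pvF, pvMsgs, pvTot] using this
  rw [haux]
  -- B's step function, rewritten through pvF/pvTot
  have hstep : (fun (st : List (String × List (String × Int) × Int) × Int) (entity : String) =>
      (insortDesc st.1 (entity,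
          (((PySem.Dict.mk d).get? entity).getD []).foldl (fun ms m => insortDesc ms m (fun p => p.2)) [],
          ((((PySem.Dict.mk d).get? entity).getD []).foldl (fun ms m => insortDesc ms m (fun p => p.2)) []).foldl
            (fun s p => s + p.2) 0) (fun t => t.2.2),
       st.2 + ((((PySem.Dict.mk d).get? entity).getD []).foldl (fun ms m => insortDesc ms m (fun p => p.2)) []).foldl
            (fun s p => s + p.2) 0))
      = (fun st entity => (insortDesc st.1 (pvF d entity) (fun t => t.2.2), st.2 + pvTot d entity)) := by
    funext st entity
    rw [foldl_insortDesc_eq_sorted]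
    rfl
  rw [hstep]
  rw [foldl_prod_split (fun r e => insortDesc r (pvF d e) (fun t => t.2.2))
      (fun s e => s + pvTot d e) el [] 0]
  -- B's ranked list equals A's sorted triple list
  have hrank : el.foldl (fun r e => insortDesc r (pvF d e) (fun t => t.2.2)) []
      = PySem.List.sorted (el.map (pvF d)) (fun v => v.2.2) true := by
    rw [← foldl_insortDesc_eq_sorted (fun t => t.2.2) (el.map (pvF d)), List.foldl_map]
  rw [hrank]
  refine Prod.ext rfl (Prod.ext ?_ rfl)
  -- freq: sum over the sorted triples = sum accumulated in input order
  show ((PySem.List.sorted (el.map (pvF d)) (fun v => v.2.2) true).map (fun v => v.2.2)).foldl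
      (fun s v => s + v) 0 = el.foldl (fun s e => s + pvTot d e) 0
  rw [foldl_add_eq_sum, foldl_add_comp_eq_sum]
  have hperm := (PySem.List.sorted_perm (el.map (pvF d)) (fun v => v.2.2) true).map
      (fun v : String × List (String × Int) × Int => v.2.2)
  rw [hperm.sum_eq, List.map_map]
  rfl
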